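-- pv_equiv track=rewrite | github.com/HoangNguyen2k3/app_NCKH_ASR | PythonApplication1.py | Tim_Kiem_Nhi_Phan
-- ===== SOURCE A (Python) =====
-- def Tim_Kiem_Nhi_Phan(chuoi, cum_tu):
--     left, right = 0, len(chuoi) - len(cum_tu)
--
--     while left <= right:
--         mid = (left + right) // 2
--
--         # Kiểm tra xem chuỗi ở vị trí mid có bắt đầu bằng cum_tu hay không
--         if chuoi[mid:mid+len(cum_tu)] == cum_tu:
--             return mid
--         # Nếu chuỗi ở vị trí mid nhỏ hơn cum_tu, tìm kiếm ở nửa bên phải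
--         elif chuoi[mid:mid+len(cum_tu)] < cum_tu:
--             left = mid + 1
--         # Ngược lại, tìm kiếm ở nửa bên trái
--         else:
--             right = mid - 1
--
--     # Trả về -1 nếu không tìm thấy
--     return -1
-- ===== SOURCE B (Python) =====
-- def Tim_Kiem_Nhi_Phan(chuoi, cum_tu):
--     # Same search path as the original, but carried out on a (left, width)
--     # interval in natural numbers instead of (left, right) bounds, with a
--     # three-way character-by-character probe (no slice objects are built).
--     m = len(cum_tu)
--
--     def probe(pos):
--         # Ordering of chuoi[pos:pos+m] versus cum_tu; every index read is
--         # in range because 0 <= pos <= len(chuoi) - m at every call site.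
--         for k in range(m):
--             c, d = chuoi[pos + k], cum_tu[k]
--             if c != d:
--                 return 'lt' if c < d else 'gt'
--         return 'eq'
--
--     def go(l, w):
--         # searches the window of w positions starting at l
--         if w == 0:
--             return -1
--         h = (w - 1) // 2
--         mid = l + h
--         o = probe(mid)
--         if o == 'eq':
--             return mid
--         if o == 'lt':
--             return go(mid + 1, w - h - 1)
--         return go(l, h)
--
--     n = len(chuoi) - m
--     if n < 0:
--         return -1
--     return go(0, n + 1)
-- ===== Notes on version B (the rewrite author's own statement) =====
-- stated objective: alternative
-- what changed: The iterative loop over Int bounds (left, right) comparing freshly-built slices is replaced by a recursion over a natural-number (left, width) window whose probe is a three-way character-by-character comparison returning an Ordering (no slice objects built, no negative arithmetic).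
import Mathlib
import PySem

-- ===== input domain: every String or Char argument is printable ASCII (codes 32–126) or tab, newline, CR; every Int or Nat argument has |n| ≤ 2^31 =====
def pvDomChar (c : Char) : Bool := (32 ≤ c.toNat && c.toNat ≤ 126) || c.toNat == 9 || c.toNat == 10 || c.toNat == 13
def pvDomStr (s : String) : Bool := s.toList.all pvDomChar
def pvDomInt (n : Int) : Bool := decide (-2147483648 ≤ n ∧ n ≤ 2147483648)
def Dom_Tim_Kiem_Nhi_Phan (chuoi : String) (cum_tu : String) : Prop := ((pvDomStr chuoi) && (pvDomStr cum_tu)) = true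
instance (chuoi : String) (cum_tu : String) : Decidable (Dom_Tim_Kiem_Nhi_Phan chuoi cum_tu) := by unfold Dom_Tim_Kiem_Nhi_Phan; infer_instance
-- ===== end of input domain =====

-- B keeps the original's exact probe sequence but re-decomposes it: the search
-- state is a (left, width) pair of naturals with a three-way character probe
-- (alternative decomposition, same cost).


-- ===== PORT A =====
-- the while-loop of A: state (left, right) over Int, one recursive call per iteration
def pvAloop (cl ct : List Char) (left right : Int) : Int :=
  if _h : left ≤ right then
    let mid := PySem.Int.floordiv (left + right) 2
    let seg := PySem.List.slice cl (some mid) (some (mid + (ct.length : Int)))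
    if seg = ct then mid
    else if seg < ct then pvAloop cl ct (mid + 1) right
    else pvAloop cl ct left (mid - 1)
  else -1
termination_by (right + 1 - left).toNat
decreasing_by
  · have h1 : left ≤ PySem.Int.floordiv (left + right) 2 :=
      (PySem.Int.le_floordiv_iff_mul_le (a := left + right) (b := 2) (q := left) (by omega)).2 (by omega)
    omega
  · have h2 : PySem.Int.floordiv (left + right) 2 < right + 1 :=
      (PySem.Int.floordiv_lt_iff_lt_mul (a := left + right) (b := 2) (q := right + 1) (by omega)).2 (by omega)
    omega

def Tim_Kiem_Nhi_Phan (chuoi : String) (cum_tu : String) : Int :=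
  pvAloop chuoi.toList cum_tu.toList 0 ((chuoi.toList.length : Int) - (cum_tu.toList.length : Int))

-- ===== PORT B =====
-- Source B's probe: Ordering of chuoi[pos:pos+m] versus cum_tu, char by char.
-- Every index it reads is in range at every call site (pos + m ≤ |cl|),
-- so the `.getD d` default is never used.
def pvProbe (cl : List Char) : Nat → List Char → Ordering
  | _, [] => .eq
  | p, d :: ds =>
    let c := cl.getD p d
    if c ≠ d then (if c < d then .lt else .gt) else pvProbe cl (p + 1) ds

-- Source B's go(l, w): searches the window of w positions starting at l
def pvBgo (cl ct : List Char) (l w : Nat) : Int :=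
  if _hw : w = 0 then -1
  else
    let h := (w - 1) / 2
    let mid := l + h
    match pvProbe cl mid ct with
    | .eq => (mid : Int)
    | .lt => pvBgo cl ct (mid + 1) (w - h - 1)
    | .gt => pvBgo cl ct l h
termination_by w
decreasing_by
  · have := Nat.div_le_self (w - 1) 2; omega
  · have := Nat.div_le_self (w - 1) 2; omega

def Tim_Kiem_Nhi_Phan_alt (chuoi : String) (cum_tu : String) : Int :=
  let cl := chuoi.toList
  let ct := cum_tu.toList
  if cl.length < ct.length then -1
  else pvBgo cl ct 0 (cl.length - ct.length + 1)

-- ===== PRECONDITION & SPEC =====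
def Spec_Tim_Kiem_Nhi_Phan (chuoi : String) (cum_tu : String) (out : Int) : Prop := out = Tim_Kiem_Nhi_Phan_alt chuoi cum_tu
instance (chuoi : String) (cum_tu : String) (out : Int) : Decidable (Spec_Tim_Kiem_Nhi_Phan chuoi cum_tu out) := by unfold Spec_Tim_Kiem_Nhi_Phan; infer_instance

-- ===== CLAIM (what is proved, stated in full; the proofs are below) =====
def Claim_equal_Tim_Kiem_Nhi_Phan : Prop := ∀ (chuoi : String) (cum_tu : String), Dom_Tim_Kiem_Nhi_Phan chuoi cum_tu → Spec_Tim_Kiem_Nhi_Phan chuoi cum_tu (Tim_Kiem_Nhi_Phan chuoi cum_tu)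

-- ===== LEMMAS AND PROOFS =====

-- B's three-way probe agrees with A's (=, <) tests on the in-range segment.
lemma pvProbe_spec (cl : List Char) : ∀ (ct : List Char) (p : Nat),
    p + ct.length ≤ cl.length →
    pvProbe cl p ct =
      (if (cl.drop p).take ct.length = ct then .eq
       else if (cl.drop p).take ct.length < ct then .lt else .gt) := by
  intro ct
  induction ct with
  | nil => intro p _; simp [pvProbe]
  | cons d ds ih =>
    intro p hlen
    have hlt : p < cl.length := by simp at hlen; omega
    have hget : cl.getD p d = cl[p] := by
      simp [List.getD_eq_getElem?_getD, hlt]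
    have hdrop : cl.drop p = cl[p] :: cl.drop (p + 1) := List.drop_eq_getElem_cons hlt
    rw [pvProbe, hdrop]
    simp only [hget, List.length_cons, List.take_succ_cons]
    by_cases hne : cl[p] = d
    · have ih' := ih (p + 1) (by simp at hlen ⊢; omega)
      rw [if_neg (by simp [hne]), hne, ih']
      simp
    · by_cases h1 : cl[p] < d
      · simp [List.cons_lt_cons_iff, hne, h1]
      · have h2 : d < cl[p] := lt_of_le_of_ne (not_lt.1 h1) (fun h => hne h.symm)
        simp [List.cons_lt_cons_iff, hne, h1]

-- A's Int mid equals B's Nat mid on the window starting at l of width w ≥ 1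
lemma mid_eq (l w : Nat) (hw : w ≠ 0) :
    PySem.Int.floordiv ((l : Int) + ((l : Int) + (w : Int) - 1)) 2 = ((l + (w - 1) / 2 : Nat) : Int) := by
  have hdm := Nat.div_add_mod (w - 1) 2
  have hml : (w - 1) % 2 < 2 := Nat.mod_lt _ (by norm_num)
  have hd1 : 2 * ((w - 1) / 2) ≤ w - 1 := by omega
  have hd2 : w - 1 < 2 * ((w - 1) / 2) + 2 := by omega
  have hle : ((l + (w - 1) / 2 : Nat) : Int) ≤ PySem.Int.floordiv ((l : Int) + ((l : Int) + (w : Int) - 1)) 2 :=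
    (PySem.Int.le_floordiv_iff_mul_le (by omega)).2 (by push_cast; omega)
  have hlt : PySem.Int.floordiv ((l : Int) + ((l : Int) + (w : Int) - 1)) 2 < ((l + (w - 1) / 2 : Nat) : Int) + 1 :=
    (PySem.Int.floordiv_lt_iff_lt_mul (by omega)).2 (by push_cast; omega)
  omega

-- main equivalence: A's (left,right) loop = B's (left,width) recursion
lemma loop_eq (cl ct : List Char) : ∀ (n : Nat) (l w : Nat), w ≤ n →
    (l : Int) + (w : Int) - 1 ≤ (cl.length : Int) - (ct.length : Int) →
    pvAloop cl ct (l : Int) ((l : Int) + (w : Int) - 1) = pvBgo cl ct l w := by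
  intro n
  induction n with
  | zero =>
    intro l w hn _
    have hw : w = 0 := by omega
    subst hw
    rw [pvAloop, pvBgo]
    simp
  | succ n ih =>
    intro l w hn hr
    by_cases hw : w = 0
    · subst hw; rw [pvAloop, pvBgo]; simp
    · have hlr : (l : Int) ≤ (l : Int) + (w : Int) - 1 := by omega
      have hmid := mid_eq l w hw
      set h := (w - 1) / 2 with hhdef
      have hh : h ≤ w - 1 := Nat.div_le_self _ _ |>.trans (by omega)
      rw [pvAloop, pvBgo]
      simp only [hlr, dite_true, dif_neg hw]
      rw [hmid]
      have hmlen : (l + h) + ct.length ≤ cl.length := by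
        have : ((l + h : Nat) : Int) ≤ (cl.length : Int) - (ct.length : Int) := by push_cast; omega
        omega
      have hseg : PySem.List.slice cl (some ((l + h : Nat) : Int)) (some (((l + h : Nat) : Int) + (ct.length : Int)))
          = (cl.drop (l + h)).take ct.length := by
        rw [PySem.List.slice_toNat _ (by positivity) (by omega)]
        congr 1
        omega
      rw [hseg, pvProbe_spec cl ct (l + h) hmlen]
      by_cases he : (cl.drop (l + h)).take ct.length = ct
      · simp only [he, if_true]
        omega
      · by_cases hl2 : (cl.drop (l + h)).take ct.length < ct
        · simp only [he, if_false, hl2, if_true]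
          have := ih (l + h + 1) (w - h - 1) (by omega) (by push_cast; omega)
          rw [show ((l + h : Nat) : Int) + 1 = ((l + h + 1 : Nat) : Int) by push_cast; ring] at *
          rw [show (l : Int) + (w : Int) - 1 = ((l + h + 1 : Nat) : Int) + ((w - h - 1 : Nat) : Int) - 1 by push_cast; omega]
          exact this
        · simp only [he, if_false, hl2]
          have := ih l h (by omega) (by omega)
          rw [show ((l + h : Nat) : Int) - 1 = (l : Int) + (h : Int) - 1 by push_cast; ring]
          exact this

-- ===== VERDICT (by name: the statement is the Claim_ definition above) =====
theorem Tim_Kiem_Nhi_Phan_spec : Claim_equal_Tim_Kiem_Nhi_Phan := by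
  intro chuoi cum_tu _
  unfold Spec_Tim_Kiem_Nhi_Phan Tim_Kiem_Nhi_Phan Tim_Kiem_Nhi_Phan_alt
  set cl := chuoi.toList
  set ct := cum_tu.toList
  by_cases hlen : cl.length < ct.length
  · simp only [hlen, if_true]
    rw [pvAloop]
    simp only []
    rw [dif_neg (by omega)]
  · simp only [hlen, if_false]
    have := loop_eq cl ct (cl.length - ct.length + 1) 0 (cl.length - ct.length + 1) le_rfl (by push_cast; omega)
    rw [show ((0 : Nat) : Int) + ((cl.length - ct.length + 1 : Nat) : Int) - 1 = (cl.length : Int) - (ct.length : Int) by push_cast; omega, Nat.cast_zero] at this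
    exact this
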